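-- pv_equiv track=rewrite | github.com/raeez/chiral-bar-cobar | compute/lib/w3_genus2.py | _half_edge_channels_at_vertex
-- ===== SOURCE A (Python) =====
-- from typing import Dict, List, Optional, Tuple
--
-- GENUS2_GRAPHS = [
--     {'name': 'smooth',   'vertices': [(2, 0)],          'edges': [],                  'aut': 1,  'h1': 0},
--     {'name': 'fig_eight','vertices': [(1, 2)],          'edges': [('self', 0)],       'aut': 2,  'h1': 1},
--     {'name': 'banana',   'vertices': [(0, 4)],          'edges': [('self', 0), ('self', 0)], 'aut': 8,  'h1': 2},
--     {'name': 'dumbbell', 'vertices': [(1, 1), (1, 1)],  'edges': [('bridge', 0, 1)],  'aut': 2,  'h1': 0},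
--     {'name': 'theta',    'vertices': [(0, 3), (0, 3)],  'edges': [('bridge', 0, 1)] * 3, 'aut': 12, 'h1': 2},
--     {'name': 'lollipop', 'vertices': [(0, 3), (1, 1)],  'edges': [('self', 0), ('bridge', 0, 1)], 'aut': 2, 'h1': 1},
--     {'name': 'barbell',  'vertices': [(0, 3), (0, 3)],  'edges': [('self', 0), ('self', 1), ('bridge', 0, 1)], 'aut': 8, 'h1': 2},
-- ]
--
-- def _half_edge_channels_at_vertex(graph_idx: int, sigma: Tuple[str, ...]) -> List[List[str]]:
--     """For each vertex, return the list of half-edge channels.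
--
--     Each bridge edge (v₁,v₂) contributes one half-edge to v₁ and one to v₂.
--     Each self-loop at v contributes two half-edges to v.
--     """
--     G = GENUS2_GRAPHS[graph_idx]
--     n_v = len(G['vertices'])
--     channels_at_v = [[] for _ in range(n_v)]
--     for edge_idx, edge in enumerate(G['edges']):
--         ch = sigma[edge_idx]
--         if edge[0] == 'self':
--             v = edge[1]
--             channels_at_v[v].append(ch)
--             channels_at_v[v].append(ch)
--         elif edge[0] == 'bridge':
--             v1, v2 = edge[1], edge[2]
--             channels_at_v[v1].append(ch)
--             channels_at_v[v2].append(ch)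
--     return channels_at_v
-- ===== SOURCE B (Python) =====
-- from typing import Dict, List, Optional, Tuple
--
-- GENUS2_GRAPHS = [
--     {'name': 'smooth',   'vertices': [(2, 0)],          'edges': [],                  'aut': 1,  'h1': 0},
--     {'name': 'fig_eight','vertices': [(1, 2)],          'edges': [('self', 0)],       'aut': 2,  'h1': 1},
--     {'name': 'banana',   'vertices': [(0, 4)],          'edges': [('self', 0), ('self', 0)], 'aut': 8,  'h1': 2},
--     {'name': 'dumbbell', 'vertices': [(1, 1), (1, 1)],  'edges': [('bridge', 0, 1)],  'aut': 2,  'h1': 0},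
--     {'name': 'theta',    'vertices': [(0, 3), (0, 3)],  'edges': [('bridge', 0, 1)] * 3, 'aut': 12, 'h1': 2},
--     {'name': 'lollipop', 'vertices': [(0, 3), (1, 1)],  'edges': [('self', 0), ('bridge', 0, 1)], 'aut': 2, 'h1': 1},
--     {'name': 'barbell',  'vertices': [(0, 3), (0, 3)],  'edges': [('self', 0), ('self', 1), ('bridge', 0, 1)], 'aut': 8, 'h1': 2},
-- ]
--
-- def _half_edge_channels_at_vertex(graph_idx: int, sigma: Tuple[str, ...]) -> List[List[str]]:
--     """Per-vertex gather: for each vertex, scan the edge list and collect channels."""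
--     G = GENUS2_GRAPHS[graph_idx]
--     result = []
--     for v in range(len(G['vertices'])):
--         chans = []
--         for edge_idx, edge in enumerate(G['edges']):
--             ch = sigma[edge_idx]
--             if edge[0] == 'self':
--                 if edge[1] == v:
--                     chans.append(ch)
--                     chans.append(ch)
--             elif edge[0] == 'bridge':
--                 if edge[1] == v:
--                     chans.append(ch)
--                 if edge[2] == v:
--                     chans.append(ch)
--         result.append(chans)
--     return result
-- ===== Notes on version B (the rewrite author's own statement) =====
-- stated objective: alternative
-- what changed: Replaces A's single scatter pass that appends each edge's channel into a preallocated per-vertex list with a per-vertex gather that, for each vertex, rescans the whole edge list and collects the channels touching it (O(E) scatter vs O(V*E) gather).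
import Mathlib
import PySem

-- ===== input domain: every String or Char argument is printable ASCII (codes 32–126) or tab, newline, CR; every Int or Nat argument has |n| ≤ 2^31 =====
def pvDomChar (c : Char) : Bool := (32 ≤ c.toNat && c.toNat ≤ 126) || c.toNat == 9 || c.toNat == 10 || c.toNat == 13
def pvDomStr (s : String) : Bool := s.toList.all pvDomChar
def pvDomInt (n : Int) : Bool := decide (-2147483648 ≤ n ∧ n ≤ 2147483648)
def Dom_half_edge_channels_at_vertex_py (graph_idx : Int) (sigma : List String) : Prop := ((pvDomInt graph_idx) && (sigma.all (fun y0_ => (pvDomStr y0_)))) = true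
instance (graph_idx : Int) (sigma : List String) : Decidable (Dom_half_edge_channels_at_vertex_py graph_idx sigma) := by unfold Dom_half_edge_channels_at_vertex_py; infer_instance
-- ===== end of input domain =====

-- B replaces A's single scatter pass over the edges by a per-vertex gather that rescans
-- the edge list for each vertex (alternative decomposition, O(V·E) instead of O(E)).

-- Shared encoding of the GENUS2_GRAPHS table: per graph, (number of vertices, edge list).
inductive PvEdge : Type
  | slf : Nat → PvEdge
  | bridge : Nat → Nat → PvEdge
deriving DecidableEq, Repr

def pvGraphs : List (Nat × List PvEdge) :=
  [ (1, []),
    (1, [.slf 0]),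
    (1, [.slf 0, .slf 0]),
    (2, [.bridge 0 1]),
    (2, [.bridge 0 1, .bridge 0 1, .bridge 0 1]),
    (2, [.slf 0, .bridge 0 1]),
    (2, [.slf 0, .slf 1, .bridge 0 1]) ]

-- ===== PORT A =====
-- channels_at_v[v].append(ch)
def pvAppendAt : List (List String) → Nat → String → List (List String)
  | [], _, _ => []
  | l :: ls, 0, ch => (l ++ [ch]) :: ls
  | l :: ls, n+1, ch => l :: pvAppendAt ls n ch

def half_edge_channels_at_vertex_py (graph_idx : Int) (sigma : List String) : List (List String) :=
  match PySem.List.pyGet? pvGraphs graph_idx with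
  | none => []   -- IndexError; excluded by Pre_
  | some G =>
    let channels_at_v : List (List String) := (List.range G.1).map (fun _ => [])
    (PySem.List.enumerate G.2 0).foldl (fun acc p =>
      match PySem.List.pyGet? sigma p.1 with
      | none => acc   -- IndexError; excluded by Pre_
      | some ch =>
        match p.2 with
        | .slf v => pvAppendAt (pvAppendAt acc v ch) v ch
        | .bridge v1 v2 => pvAppendAt (pvAppendAt acc v1 ch) v2 ch) channels_at_v

-- ===== PORT B =====
def half_edge_channels_at_vertex_py_alt (graph_idx : Int) (sigma : List String) : List (List String) :=
  match PySem.List.pyGet? pvGraphs graph_idx with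
  | none => []   -- IndexError; excluded by Pre_
  | some G =>
    (List.range G.1).map (fun v =>
      (PySem.List.enumerate G.2 0).foldl (fun chans p =>
        match PySem.List.pyGet? sigma p.1 with
        | none => chans   -- IndexError; excluded by Pre_
        | some ch =>
          match p.2 with
          | .slf w => if w = v then chans ++ [ch, ch] else chans
          | .bridge v1 v2 =>
            let chans1 := if v1 = v then chans ++ [ch] else chans
            if v2 = v then chans1 ++ [ch] else chans1) [])

-- ===== PRECONDITION & SPEC =====
-- Pre_ excludes exactly the IndexErrors: graph_idx must index the 7-entry table
-- (Python negative wraparound allowed) and sigma must supply one channel per edge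
-- of that graph (edge counts 0,1,2,1,3,2,3 for graphs 0..6, spelled out below).
def Pre_half_edge_channels_at_vertex_py (graph_idx : Int) (sigma : List String) : Prop :=
  (-7 ≤ graph_idx ∧ graph_idx < 7) ∧
  (if graph_idx = 0 ∨ graph_idx = -7 then 0
   else if graph_idx = 1 ∨ graph_idx = -6 then 1
   else if graph_idx = 2 ∨ graph_idx = -5 then 2
   else if graph_idx = 3 ∨ graph_idx = -4 then 1
   else if graph_idx = 4 ∨ graph_idx = -3 then 3
   else if graph_idx = 5 ∨ graph_idx = -2 then 2
   else 3) ≤ sigma.length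
instance (graph_idx : Int) (sigma : List String) : Decidable (Pre_half_edge_channels_at_vertex_py graph_idx sigma) := by unfold Pre_half_edge_channels_at_vertex_py; infer_instance

def pvWitness_half_edge_channels_at_vertex_py : Int × List String := (4, ["a", "b", "c"])

def Spec_half_edge_channels_at_vertex_py (graph_idx : Int) (sigma : List String) (out : List (List String)) : Prop := out = half_edge_channels_at_vertex_py_alt graph_idx sigma
instance (graph_idx : Int) (sigma : List String) (out : List (List String)) : Decidable (Spec_half_edge_channels_at_vertex_py graph_idx sigma out) := by unfold Spec_half_edge_channels_at_vertex_py; infer_instance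

-- ===== CLAIM (what is proved, stated in full; the proofs are below) =====
def Claim_equal_half_edge_channels_at_vertex_py : Prop := ∀ (graph_idx : Int) (sigma : List String), Dom_half_edge_channels_at_vertex_py graph_idx sigma → Pre_half_edge_channels_at_vertex_py graph_idx sigma → Spec_half_edge_channels_at_vertex_py graph_idx sigma (half_edge_channels_at_vertex_py graph_idx sigma)

-- ===== LEMMAS AND PROOFS =====
-- pyGet? at the literal indices 1 and 2 that enumerate produces (index 0 is PySem.List.pyGet?_zero_cons)
lemma pvGet1 {α : Type} (x y : α) (xs : List α) : PySem.List.pyGet? (x::y::xs) 1 = some y := by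
  simp [PySem.List.pyGet?, PySem.List.pyIdx?]
lemma pvGet2 {α : Type} (x y z : α) (xs : List α) : PySem.List.pyGet? (x::y::z::xs) 2 = some z := by
  have h : ((2:Int) ≤ (xs.length:Int) + 1 + 1) := by omega
  simp [PySem.List.pyGet?, PySem.List.pyIdx?, h]

-- ===== VERDICT (by name: the statement is the Claim_ definition above) =====
set_option maxHeartbeats 2000000 in
theorem half_edge_channels_at_vertex_py_spec : Claim_equal_half_edge_channels_at_vertex_py := by
  intro graph_idx sigma _ hpre
  obtain ⟨⟨hlo, hhi⟩, hlen⟩ := hpre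
  unfold Spec_half_edge_channels_at_vertex_py
  interval_cases graph_idx <;>
    rcases sigma with _ | ⟨s0, _ | ⟨s1, _ | ⟨s2, rest⟩⟩⟩ <;>
    (try simp at hlen) <;>
    simp only [half_edge_channels_at_vertex_py, half_edge_channels_at_vertex_py_alt] <;>
    (try simp only [show PySem.List.pyGet? pvGraphs (-7) = some (1, ([] : List PvEdge)) from by decide]) <;>
    (try simp only [show PySem.List.pyGet? pvGraphs (-6) = some (1, [PvEdge.slf 0]) from by decide]) <;>
    (try simp only [show PySem.List.pyGet? pvGraphs (-5) = some (1, [PvEdge.slf 0, PvEdge.slf 0]) from by decide]) <;>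
    (try simp only [show PySem.List.pyGet? pvGraphs (-4) = some (2, [PvEdge.bridge 0 1]) from by decide]) <;>
    (try simp only [show PySem.List.pyGet? pvGraphs (-3) = some (2, [PvEdge.bridge 0 1, PvEdge.bridge 0 1, PvEdge.bridge 0 1]) from by decide]) <;>
    (try simp only [show PySem.List.pyGet? pvGraphs (-2) = some (2, [PvEdge.slf 0, PvEdge.bridge 0 1]) from by decide]) <;>
    (try simp only [show PySem.List.pyGet? pvGraphs (-1) = some (2, [PvEdge.slf 0, PvEdge.slf 1, PvEdge.bridge 0 1]) from by decide]) <;>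
    (try simp only [show PySem.List.pyGet? pvGraphs (0) = some (1, ([] : List PvEdge)) from by decide]) <;>
    (try simp only [show PySem.List.pyGet? pvGraphs (1) = some (1, [PvEdge.slf 0]) from by decide]) <;>
    (try simp only [show PySem.List.pyGet? pvGraphs (2) = some (1, [PvEdge.slf 0, PvEdge.slf 0]) from by decide]) <;>
    (try simp only [show PySem.List.pyGet? pvGraphs (3) = some (2, [PvEdge.bridge 0 1]) from by decide]) <;>
    (try simp only [show PySem.List.pyGet? pvGraphs (4) = some (2, [PvEdge.bridge 0 1, PvEdge.bridge 0 1, PvEdge.bridge 0 1]) from by decide]) <;>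
    (try simp only [show PySem.List.pyGet? pvGraphs (5) = some (2, [PvEdge.slf 0, PvEdge.bridge 0 1]) from by decide]) <;>
    (try simp only [show PySem.List.pyGet? pvGraphs (6) = some (2, [PvEdge.slf 0, PvEdge.slf 1, PvEdge.bridge 0 1]) from by decide]) <;>
    simp [pvAppendAt, PySem.List.enumerate_cons, PySem.List.enumerate_nil,
      PySem.List.pyGet?_zero_cons, pvGet1, pvGet2, List.range_succ]
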